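-- pv_equiv track=rewrite | github.com/zxl819/LearnPython | review0201/CompareBackSpace.py | helper
-- ===== SOURCE A (Python) =====
-- def helper(s):
--     s0 = []
--     for word in s:
--         if word != "#":
--             s0.append(word)
--         elif s0:
--             s0.pop()
--     return s0
-- ===== SOURCE B (Python) =====
-- def helper(s):
--     skip = 0
--     res = []
--     for word in reversed(s):
--         if word == "#":
--             skip += 1
--         elif skip > 0:
--             skip -= 1
--         else:
--             res.append(word)
--     res.reverse()
--     return res
-- ===== Notes on version B (the rewrite author's own statement) =====
-- stated objective: alternative
-- what changed: Replaces the forward stack simulation (append/pop) with a single backward scan keeping an integer skip counter of pending backspaces, collecting survivors in reverse and reversing once at the end.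
import Mathlib
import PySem

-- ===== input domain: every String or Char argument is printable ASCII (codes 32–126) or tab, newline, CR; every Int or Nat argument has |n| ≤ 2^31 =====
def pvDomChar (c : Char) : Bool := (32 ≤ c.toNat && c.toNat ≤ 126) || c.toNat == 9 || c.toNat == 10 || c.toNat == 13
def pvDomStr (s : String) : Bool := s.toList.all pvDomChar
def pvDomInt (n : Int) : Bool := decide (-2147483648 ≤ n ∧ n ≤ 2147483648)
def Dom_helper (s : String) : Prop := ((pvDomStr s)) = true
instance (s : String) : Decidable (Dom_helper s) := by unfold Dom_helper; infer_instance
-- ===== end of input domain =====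

-- B replaces A's forward stack (append/pop) by a backward scan with a skip counter; alternative decomposition, same cost.

-- ===== PORT A =====
-- one step of A's loop body: push the character unless it is '#', else pop if nonempty
def aStep (s0 : List String) (c : Char) : List String :=
  if c ≠ '#' then s0 ++ [String.ofList [c]]
  else if s0 ≠ [] then s0.dropLast
  else s0

def helper (s : String) : List String := s.toList.foldl aStep []

-- ===== PORT B =====
-- backward scan: skip counts pending '#'s; survivors collected in reverse order, reversed at the end
def altGo : List Char → Nat → List String → List String
  | [], _, res => res.reverse
  | c :: rest, skip, res =>
    if c = '#' then altGo rest (skip + 1) res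
    else if skip > 0 then altGo rest (skip - 1) res
    else altGo rest skip (res ++ [String.ofList [c]])

def helper_alt (s : String) : List String := altGo s.toList.reverse 0 []

-- ===== PRECONDITION & SPEC =====
def Spec_helper (s : String) (out : List String) : Prop := out = helper_alt s
instance (s : String) (out : List String) : Decidable (Spec_helper s out) := by unfold Spec_helper; infer_instance

-- ===== CLAIM (what is proved, stated in full; the proofs are below) =====
def Claim_equal_helper : Prop := ∀ (s : String), Dom_helper s → Spec_helper s (helper s)

-- ===== LEMMAS AND PROOFS =====

theorem iterate_dropLast_nil (k : Nat) :
    (List.dropLast)^[k] ([] : List String) = [] :=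
  Function.iterate_fixed rfl k

theorem aStep_hash (x : List String) : aStep x '#' = x.dropLast := by
  unfold aStep
  by_cases h : x = [] <;> simp [h]

-- main invariant: altGo on the reversed remainder equals A's stack with `skip` last elements dropped, followed by collected survivors
theorem altGo_eq (r : List Char) : ∀ (k : Nat) (res : List String),
    altGo r k res = (List.dropLast)^[k] (r.reverse.foldl aStep []) ++ res.reverse := by
  induction r with
  | nil =>
    intro k res
    simp [altGo, iterate_dropLast_nil]
  | cons c r ih =>
    intro k res
    have hfold : (c :: r).reverse.foldl aStep [] = aStep (r.reverse.foldl aStep []) c := by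
      simp [List.foldl_append]
    by_cases hc : c = '#'
    · subst hc
      have h1 : altGo ('#' :: r) k res = altGo r (k + 1) res := by simp [altGo]
      rw [h1, ih, hfold, aStep_hash, ← Function.iterate_succ_apply]
    · cases k with
      | zero =>
        simp only [altGo, if_neg hc, ih, hfold]
        unfold aStep
        simp [hc]
      | succ k' =>
        simp only [altGo, if_neg hc, Nat.succ_sub_one, if_pos (Nat.succ_pos k'), ih, hfold]
        unfold aStep
        rw [if_pos (by simpa using hc), Function.iterate_succ_apply]
        simp

-- ===== VERDICT (by name: the statement is the Claim_ definition above) =====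
theorem helper_spec : Claim_equal_helper := by
  intro s _
  unfold Spec_helper helper_alt helper
  rw [altGo_eq]
  simp
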